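-- pv_equiv track=rewrite | github.com/dhsong95/programmers-algorithm-challenges | 2019 KAKAO BLIND RECRUITMENT/후보키.py | check_uniqueness
-- ===== SOURCE A (Python) =====
-- def check_uniqueness(column_indices, relation):
--     n_row = len(relation)
--
--     new_rows = set()
--     for row in relation:
--         new_row = ''
--         for cdx in column_indices:
--             new_row += row[cdx]
--         new_rows.add(new_row)
--
--     if len(new_rows) == n_row:
--         return True
--     else:
--         return False
-- ===== SOURCE B (Python) =====
-- def check_uniqueness(column_indices, relation):
--     keys = [_key(column_indices, row) for row in relation]
--     keys.sort()
--     for prev, cur in zip(keys, keys[1:]):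
--         if prev == cur:
--             return False
--     return True
--
--
-- def _key(column_indices, row):
--     key = ''
--     for cdx in column_indices:
--         key += row[cdx]
--     return key
-- ===== Notes on version B (the rewrite author's own statement) =====
-- stated objective: alternative
-- what changed: Replaces A's set-cardinality test (build a set of row keys, compare its size with the row count) by sorting the list of row keys and scanning adjacent pairs, returning False at the first equal neighbour (early exit).
import Mathlib
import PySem

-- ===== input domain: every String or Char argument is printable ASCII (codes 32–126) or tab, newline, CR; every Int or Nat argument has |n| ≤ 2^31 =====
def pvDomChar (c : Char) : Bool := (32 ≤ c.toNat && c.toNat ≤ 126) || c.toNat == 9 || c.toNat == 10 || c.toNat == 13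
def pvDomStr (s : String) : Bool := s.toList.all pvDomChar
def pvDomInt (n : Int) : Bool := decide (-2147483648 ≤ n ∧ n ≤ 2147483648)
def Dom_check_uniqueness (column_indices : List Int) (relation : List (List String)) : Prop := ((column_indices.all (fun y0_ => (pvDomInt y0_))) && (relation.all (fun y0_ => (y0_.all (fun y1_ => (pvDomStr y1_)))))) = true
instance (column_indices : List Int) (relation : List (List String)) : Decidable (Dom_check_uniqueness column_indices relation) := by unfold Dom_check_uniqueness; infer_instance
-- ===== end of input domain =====

-- B replaces A's set-cardinality test by sort-then-adjacent-scan duplicate detection (alternative algorithm, same result).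

-- ===== PORT A =====
-- the key "new_row": '' then new_row += row[cdx]; strings are kept as List Char (PySem style);
-- row[cdx] is PySem.List.pyGetD, exact under Pre_ (Python raises IndexError exactly where pyGet? is none)
def pvKeyA (column_indices : List Int) (row : List String) : List Char :=
  column_indices.foldl (fun new_row cdx => new_row ++ (PySem.List.pyGetD row cdx "").toList) []

def check_uniqueness (column_indices : List Int) (relation : List (List String)) : Bool :=
  let n_row : Int := relation.length
  let new_rows : PySem.Set (List Char) :=
    relation.foldl (fun s row => PySem.Set.add s (pvKeyA column_indices row)) PySem.Set.empty
  if PySem.Set.len new_rows = n_row then true else false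

-- ===== PORT B =====
-- B's helper _key builds the same concatenated key (string as List Char)
def pvKeyB (column_indices : List Int) (row : List String) : List Char :=
  column_indices.foldl (fun key cdx => key ++ (PySem.List.pyGetD row cdx "").toList) []

-- the zip(keys, keys[1:]) early-return scan of Source B
def pvAdjDistinct : List (List Char) → Bool
  | prev :: cur :: rest => if prev == cur then false else pvAdjDistinct (cur :: rest)
  | _ => true

def check_uniqueness_alt (column_indices : List Int) (relation : List (List String)) : Bool :=
  let keys := relation.map (fun row => pvKeyB column_indices row)
  let sortedKeys := PySem.List.sorted keys (fun k => k)
  pvAdjDistinct sortedKeys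

-- ===== PRECONDITION & SPEC =====
-- exactly the inputs where Python A returns: every row[cdx] access is in range (else IndexError)
def Pre_check_uniqueness (column_indices : List Int) (relation : List (List String)) : Prop :=
  ∀ row ∈ relation, ∀ cdx ∈ column_indices, PySem.Raise.InRange row.length cdx
instance (column_indices : List Int) (relation : List (List String)) : Decidable (Pre_check_uniqueness column_indices relation) := by unfold Pre_check_uniqueness; infer_instance

def pvWitness_check_uniqueness : List Int × List (List String) := ([0, -1], [["a", "b"], ["c", "d"]])

def Spec_check_uniqueness (column_indices : List Int) (relation : List (List String)) (out : Bool) : Prop := out = check_uniqueness_alt column_indices relation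
instance (column_indices : List Int) (relation : List (List String)) (out : Bool) : Decidable (Spec_check_uniqueness column_indices relation out) := by unfold Spec_check_uniqueness; infer_instance

-- ===== CLAIM (what is proved, stated in full; the proofs are below) =====
def Claim_equal_check_uniqueness : Prop := ∀ (column_indices : List Int) (relation : List (List String)), Dom_check_uniqueness column_indices relation → Pre_check_uniqueness column_indices relation → Spec_check_uniqueness column_indices relation (check_uniqueness column_indices relation)

-- ===== LEMMAS AND PROOFS =====

-- fold of Set.add never grows past the number of inserted elements
lemma pv_foldl_add_length_le {α : Type} [BEq α] (xs : List α) (s : PySem.Set α) :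
    (List.foldl PySem.Set.add s xs).length ≤ s.length + xs.length := by
  induction xs generalizing s with
  | nil => simp
  | cons x xs ih =>
    simp only [List.foldl_cons, List.length_cons]
    refine le_trans (ih (PySem.Set.add s x)) ?_
    have : (PySem.Set.add s x).length ≤ s.length + 1 := by
      unfold PySem.Set.add; split <;> simp
    omega

-- the fold reaches full length exactly when the inserted elements are distinct and new
lemma pv_foldl_add_length_iff {α : Type} [BEq α] [LawfulBEq α] (xs : List α) (s : PySem.Set α) :
    (List.foldl PySem.Set.add s xs).length = s.length + xs.length ↔
      (xs.Nodup ∧ ∀ x ∈ xs, x ∉ s) := by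
  induction xs generalizing s with
  | nil => simp
  | cons x xs ih =>
    simp only [List.foldl_cons, List.length_cons, List.nodup_cons, List.mem_cons]
    by_cases hx : x ∈ s
    · have hadd : PySem.Set.add s x = s := by
        unfold PySem.Set.add; simp [List.contains_eq_mem, hx]
      constructor
      · intro h
        exfalso
        have := pv_foldl_add_length_le xs s
        rw [hadd] at h; omega
      · rintro ⟨-, hnew⟩
        exact absurd hx (hnew x (Or.inl rfl))
    · have hadd : PySem.Set.add s x = s ++ [x] := by
        unfold PySem.Set.add; simp [List.contains_eq_mem, hx]
      rw [hadd] at *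
      have hlen : (s ++ [x]).length = s.length + 1 := by simp
      constructor
      · intro h
        have h' := (ih (s ++ [x])).mp (by rw [hlen] at *; omega)
        obtain ⟨hnd, hnew⟩ := h'
        refine ⟨⟨fun hxmem => ?_, hnd⟩, ?_⟩
        · exact (hnew x hxmem) (by simp)
        · intro y hy
          rcases hy with rfl | hy
          · exact hx
          · intro hys; exact (hnew y hy) (by simp [hys])
      · rintro ⟨⟨hxnot, hnd⟩, hnew⟩
        rw [(ih (s ++ [x])).mpr ⟨hnd, ?_⟩, hlen]
        · omega
        · intro y hy
          simp only [List.mem_append, List.mem_singleton]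
          rintro (hys | rfl)
          · exact (hnew y (Or.inr hy)) hys
          · exact hxnot hy

-- A returns true exactly when the key list has no duplicates
lemma pv_A_iff (column_indices : List Int) (relation : List (List String)) :
    check_uniqueness column_indices relation = true ↔
      (relation.map (fun row => pvKeyA column_indices row)).Nodup := by
  unfold check_uniqueness
  rw [show relation.foldl (fun s row => PySem.Set.add s (pvKeyA column_indices row)) PySem.Set.empty
        = List.foldl PySem.Set.add PySem.Set.empty
            (relation.map (fun row => pvKeyA column_indices row))
      from by rw [List.foldl_map]]
  simp only [PySem.Set.empty]
  set keys := relation.map (fun row => pvKeyA column_indices row) with hkeys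
  have hiff : (List.foldl PySem.Set.add ([] : PySem.Set (List Char)) keys).length = keys.length ↔
      keys.Nodup := by
    simpa using pv_foldl_add_length_iff keys []
  have hlen : keys.length = relation.length := by simp [hkeys]
  by_cases h : keys.Nodup
  · have hc : PySem.Set.len (List.foldl PySem.Set.add ([] : PySem.Set (List Char)) keys)
        = (relation.length : Int) := by
      have h1 := hiff.mpr h
      simp only [PySem.Set.len]
      omega
    rw [if_pos hc]
    simp [h]
  · have hc : PySem.Set.len (List.foldl PySem.Set.add ([] : PySem.Set (List Char)) keys)
        ≠ (relation.length : Int) := by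
      intro hc
      apply h
      apply hiff.mp
      simp only [PySem.Set.len] at hc
      omega
    rw [if_neg hc]
    simp [h]

-- adjacent scan of a ≤-sorted list detects exactly the duplicates
lemma pv_adj_iff (l : List (List Char)) (hs : l.Pairwise (fun a b => a ≤ b)) :
    pvAdjDistinct l = true ↔ l.Nodup := by
  induction l with
  | nil => simp [pvAdjDistinct]
  | cons a t ih =>
    cases t with
    | nil => simp [pvAdjDistinct]
    | cons b t =>
      rcases List.pairwise_cons.mp hs with ⟨hale, hs'⟩
      have hab : a ≤ b := hale b (by simp)
      constructor
      · intro h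
        unfold pvAdjDistinct at h
        split_ifs at h with hne
        have hne' : a ≠ b := by simpa using hne
        have hnd := (ih hs').mp h
        refine List.nodup_cons.mpr ⟨?_, hnd⟩
        intro hmem
        rcases List.mem_cons.mp hmem with rfl | hmt
        · exact hne' rfl
        · have hbz : b ≤ a := (List.pairwise_cons.mp hs').1 a hmt
          exact hne' (le_antisymm hab hbz)
      · intro hnd
        rcases List.nodup_cons.mp hnd with ⟨hnot, hnd'⟩
        unfold pvAdjDistinct
        have hne' : a ≠ b := fun he => hnot (he ▸ List.mem_cons_self ..)
        simp only [beq_iff_eq, hne', if_false]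
        exact (ih hs').mpr hnd'

-- B returns true exactly when the key list has no duplicates
lemma pv_B_iff (column_indices : List Int) (relation : List (List String)) :
    check_uniqueness_alt column_indices relation = true ↔
      (relation.map (fun row => pvKeyB column_indices row)).Nodup := by
  have hp : List.Pairwise (fun a b : List Char => a ≤ b)
      (PySem.List.sorted (relation.map (fun row => pvKeyB column_indices row)) (fun k => k)) := by
    have h2 := PySem.List.sorted_pairwise
      (relation.map (fun row => pvKeyB column_indices row)) (fun k : List Char => k)
    convert h2 using 2
  have h1 := pv_adj_iff
      (PySem.List.sorted (relation.map (fun row => pvKeyB column_indices row)) (fun k => k)) hp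
  exact h1.trans (PySem.List.sorted_perm _ _ false).nodup_iff

-- ===== VERDICT (by name: the statement is the Claim_ definition above) =====
theorem check_uniqueness_spec : Claim_equal_check_uniqueness := by
  intro column_indices relation _ _
  unfold Spec_check_uniqueness
  have hk : pvKeyB column_indices = pvKeyA column_indices := rfl
  rw [Bool.eq_iff_iff, pv_A_iff, pv_B_iff, hk]
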